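-- pv_equiv track=rewrite | github.com/ykamoji/open-ai-maya-audio-generation | Generator/Dialogues.py | combine_lines
-- ===== SOURCE A (Python) =====
-- punctuations = [',', '!', '?', '.', ':', '"']
--
-- def combine_lines(sentences, limit):
--     lines = []
--     current = ""
--     for m in sentences:
--         if len(current.split()) + len(m.split()) <= limit:
--             current += m.strip() + (" " if m.strip()[-1] in punctuations else ". ")
--         else:
--             if current.strip() != "":
--                 lines.append(current.strip())
--             current = m.strip() + (" " if m.strip()[-1] in punctuations else ". ")
--     if current.strip() != "":
--         lines.append(current.strip() + ("" if current.strip()[-1] in punctuations else "."))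
--     return lines
-- ===== SOURCE B (Python) =====
-- punctuations = [',', '!', '?', '.', ':', '"']
--
-- def combine_lines(sentences, limit):
--     # Staged passes: format pieces and counts, compute break indices from the
--     # counts alone, then cut the piece list at the breaks and join each group.
--     pieces = [m.strip() + (" " if m.strip()[-1] in punctuations else ". ") for m in sentences]
--     counts = [len(m.split()) for m in sentences]
--     starts = []
--     total = 0
--     for i, w in enumerate(counts):
--         if total + w > limit:
--             starts.append(i)
--             total = w
--         else:
--             total += w
--     bounds = [0] + starts + [len(pieces)]
--     return ["".join(pieces[a:b])[:-1] for a, b in zip(bounds, bounds[1:]) if a < b]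
-- ===== Notes on version B (the rewrite author's own statement) =====
-- stated objective: faster
-- what changed: B is restructured into three staged passes - format each sentence into a piece and its word count, compute the greedy break indices from the counts alone, then cut the piece list at those breaks and join each group - instead of A's single pass that re-splits and re-concatenates a growing accumulator string on every iteration.
import Mathlib
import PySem

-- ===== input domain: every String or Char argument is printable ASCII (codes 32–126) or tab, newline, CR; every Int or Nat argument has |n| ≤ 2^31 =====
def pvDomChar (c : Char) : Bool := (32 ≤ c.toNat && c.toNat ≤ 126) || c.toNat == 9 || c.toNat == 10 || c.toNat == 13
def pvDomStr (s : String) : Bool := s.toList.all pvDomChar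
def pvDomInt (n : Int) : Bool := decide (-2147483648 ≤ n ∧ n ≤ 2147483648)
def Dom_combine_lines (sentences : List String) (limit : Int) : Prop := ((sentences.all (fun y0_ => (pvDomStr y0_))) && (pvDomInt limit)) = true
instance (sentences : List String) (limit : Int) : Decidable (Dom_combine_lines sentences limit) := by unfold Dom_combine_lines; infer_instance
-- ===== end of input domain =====

-- B replaces A's single pass with a growing, repeatedly re-split accumulator string by three
-- staged passes: format pieces and word counts, compute break indices from the counts alone,
-- then cut the piece list at the breaks (objective: faster).

-- module-level constant `punctuations`
def pvPunct : List Char := [',', '!', '?', '.', ':', '"']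

-- the expression `m.strip() + (" " if m.strip()[-1] in punctuations else ". ")`, occurring in both
-- Pythons; m.strip()[-1] raises IndexError when m.strip() == "" — PySem.List.pyGet? returns none
-- there (excluded by Pre_), so the .getD ' ' default is never reached on Pre_.
def pvPiece (m : String) : List Char :=
  let ms := PySem.Chars.strip m.toList
  ms ++ (if pvPunct.contains ((PySem.List.pyGet? ms (-1)).getD ' ') then [' '] else ['.', ' '])

-- ===== PORT A =====
-- loop body of A: state = (lines, current)
def pvStepA (limit : Int) (st : List (List Char) × List Char) (m : String) : List (List Char) × List Char :=
  if ((PySem.Chars.split₀ st.2).length : Int) + ((PySem.Chars.split₀ m.toList).length : Int) ≤ limit then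
    (st.1, st.2 ++ pvPiece m)
  else
    ((if PySem.Chars.strip st.2 ≠ [] then st.1 ++ [PySem.Chars.strip st.2] else st.1), pvPiece m)

def combine_lines (sentences : List String) (limit : Int) : List String :=
  let r := sentences.foldl (pvStepA limit) ([], [])
  let cs := PySem.Chars.strip r.2
  (if cs ≠ [] then
      r.1 ++ [cs ++ (if pvPunct.contains ((PySem.List.pyGet? cs (-1)).getD ' ') then [] else ['.'])]
    else r.1).map String.ofList

-- ===== PORT B =====
-- `len(m.split())`
def pvWeight (m : String) : Int := ((PySem.Chars.split₀ m.toList).length : Int)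

-- body of B's stage-2 loop over enumerate(counts): state = (starts, total)
def pvStepC (limit : Int) (st : List Int × Int) (p : Int × Int) : List Int × Int :=
  if st.2 + p.2 > limit then (st.1 ++ [p.1], p.2) else (st.1, st.2 + p.2)

-- B's stage-3 comprehension: `["".join(pieces[a:b])[:-1] for a, b in zip(bounds, bounds[1:]) if a < b]`
-- ("".join = flatten, s[:-1] = dropLast per PySem.Str.slice_to_neg_one)
def pvRender (pieces : List (List Char)) (bounds : List Int) : List (List Char) :=
  (bounds.zip bounds.tail).filterMap
    (fun ab => if ab.1 < ab.2 then
        some ((PySem.List.slice pieces (some ab.1) (some ab.2)).flatten.dropLast) else none)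

def combine_lines_alt (sentences : List String) (limit : Int) : List String :=
  let pieces := sentences.map pvPiece
  let counts := sentences.map pvWeight
  let r := (PySem.List.enumerate counts 0).foldl (pvStepC limit) ([], 0)
  let bounds : List Int := [0] ++ r.1 ++ [PySem.List.len pieces]
  -- bounds[1:] = bounds.tail (PySem.List.slice_from_one)
  (pvRender pieces bounds).map String.ofList

-- ===== PRECONDITION & SPEC =====
-- Pre_ excludes exactly the inputs where some sentence strips to "", on which both A and B
-- raise IndexError at m.strip()[-1].
def Pre_combine_lines (sentences : List String) (limit : Int) : Prop :=
  ∀ m ∈ sentences, PySem.Chars.strip m.toList ≠ []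
instance (sentences : List String) (limit : Int) : Decidable (Pre_combine_lines sentences limit) := by
  unfold Pre_combine_lines; infer_instance
def pvWitness_combine_lines : List String × Int := (["Hello there", "fine!", "yes"], 3)

def Spec_combine_lines (sentences : List String) (limit : Int) (out : List String) : Prop := out = combine_lines_alt sentences limit
instance (sentences : List String) (limit : Int) (out : List String) : Decidable (Spec_combine_lines sentences limit out) := by unfold Spec_combine_lines; infer_instance

-- ===== CLAIM (what is proved, stated in full; the proofs are below) =====
def Claim_equal_combine_lines : Prop := ∀ (sentences : List String) (limit : Int), Dom_combine_lines sentences limit → Pre_combine_lines sentences limit → Spec_combine_lines sentences limit (combine_lines sentences limit)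

-- ===== LEMMAS AND PROOFS =====

-- proof-side intermediate: a one-pass fold over chunk lists, the common reading of A and B
def pvEmit (parts : List (List Char)) : List (List Char) :=
  if parts ≠ [] then [parts.flatten.dropLast] else []

def pvStepB (limit : Int) (st : List (List Char) × List (List Char) × Int) (m : String) :
    List (List Char) × List (List Char) × Int :=
  if st.2.2 + pvWeight m ≤ limit then
    (st.1, st.2.1 ++ [pvPiece m], st.2.2 + pvWeight m)
  else
    (st.1 ++ pvEmit st.2.1, [pvPiece m], pvWeight m)

theorem pv_go_nil (cur : List Char) (acc) : PySem.Chars.split₀.go [] cur acc = if cur.isEmpty then acc.reverse else (cur.reverse :: acc).reverse := by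
  simp [PySem.Chars.split₀.go]

theorem pv_go_cons (c : Char) (rest cur acc) : PySem.Chars.split₀.go (c::rest) cur acc =
    if PySem.Chars.isspace c then (if cur.isEmpty then PySem.Chars.split₀.go rest [] acc else PySem.Chars.split₀.go rest [] (cur.reverse :: acc)) else PySem.Chars.split₀.go rest (c::cur) acc := by
  simp [PySem.Chars.split₀.go]

theorem pv_dropWhile_head? {p : Char → Bool} {l : List Char} {a : Char} (h : (l.dropWhile p).head? = some a) : p a = false := by
  induction l with
  | nil => simp at h
  | cons c t ih =>
    by_cases hc : p c
    · simp [hc] at h; exact ih h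
    · simp [hc] at h; simp [← h]; simpa using hc

theorem pv_dropWhile_eq_self {p : Char → Bool} {l : List Char} (h : ∀ c, l.head? = some c → p c = false) : l.dropWhile p = l := by
  cases l with
  | nil => rfl
  | cons c t => simp [h c rfl]

theorem pv_pyGet_neg_one {l : List Char} (h : l ≠ []) : PySem.List.pyGet? l (-1) = l.getLast? := by
  have h1 : 1 ≤ l.length := by cases l with
    | nil => simp at h
    | cons a t => simp
  simp [PySem.List.pyGet?, PySem.List.pyIdx?, h1, List.getLast?_eq_getElem?]

theorem pv_go_acc_append : ∀ (s cur : List Char) (acc₁ acc₂ : List (List Char)),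
    PySem.Chars.split₀.go s cur (acc₁ ++ acc₂) = acc₂.reverse ++ PySem.Chars.split₀.go s cur acc₁ := by
  intro s
  induction s with
  | nil => intro cur a1 a2; simp [pv_go_nil]; split_ifs <;> simp
  | cons c t ih =>
    intro cur a1 a2
    simp only [pv_go_cons]
    split_ifs
    · exact ih _ _ _
    · simpa using ih [] (cur.reverse :: a1) a2
    · exact ih _ _ _

theorem pv_go_acc (s cur : List Char) (acc : List (List Char)) :
    PySem.Chars.split₀.go s cur acc = acc.reverse ++ PySem.Chars.split₀.go s cur [] := by
  simpa using pv_go_acc_append s cur [] acc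

theorem pv_go_allws : ∀ (t : List Char) (cur : List Char) acc, t.all PySem.Chars.isspace →
    PySem.Chars.split₀.go t cur acc = PySem.Chars.split₀.go [] cur acc := by
  intro t
  induction t with
  | nil => intros; rfl
  | cons c t ih =>
    intro cur acc h
    simp only [List.all_cons, Bool.and_eq_true] at h
    simp only [pv_go_cons, h.1, if_true]
    split_ifs with h2
    · rw [ih _ _ h.2]
      simp [pv_go_nil, h2]
    · rw [ih _ _ h.2]
      simp [pv_go_nil, h2]

theorem pv_go_append_allws : ∀ (s t cur : List Char) acc, t.all PySem.Chars.isspace →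
    PySem.Chars.split₀.go (s ++ t) cur acc = PySem.Chars.split₀.go s cur acc := by
  intro s
  induction s with
  | nil => intro t cur acc h; simpa using pv_go_allws t cur acc h
  | cons c s ih =>
    intro t cur acc h
    simp only [List.cons_append, pv_go_cons]
    split_ifs <;> rw [ih _ _ _ h]

theorem pv_split₀_append_ws (s t : List Char) (h : t.all PySem.Chars.isspace) :
    PySem.Chars.split₀ (s ++ t) = PySem.Chars.split₀ s := by
  unfold PySem.Chars.split₀; exact pv_go_append_allws s t [] [] h

theorem pv_go_lstrip : ∀ (s : List Char) acc,
    PySem.Chars.split₀.go (s.dropWhile PySem.Chars.isspace) [] acc = PySem.Chars.split₀.go s [] acc := by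
  intro s
  induction s with
  | nil => intro acc; rfl
  | cons c s ih =>
    intro acc
    by_cases h : PySem.Chars.isspace c
    · simp [h, pv_go_cons, ih]
    · simp [h]

theorem pv_rstrip_decomp (s : List Char) : ∃ t, s = PySem.Chars.rstrip s ++ t ∧ t.all PySem.Chars.isspace := by
  refine ⟨(s.reverse.takeWhile PySem.Chars.isspace).reverse, ?_, ?_⟩
  · conv_lhs => rw [← s.reverse_reverse, ← List.takeWhile_append_dropWhile (p := PySem.Chars.isspace) (l := s.reverse)]
    rw [List.reverse_append, PySem.Chars.rstrip]
  · simp only [List.all_reverse, List.all_eq_true]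
    intro c hc; exact List.mem_takeWhile_imp hc

theorem pv_split₀_strip (s : List Char) : PySem.Chars.split₀ (PySem.Chars.strip s) = PySem.Chars.split₀ s := by
  obtain ⟨t, ht, hall⟩ := pv_rstrip_decomp (PySem.Chars.lstrip s)
  have h1 : PySem.Chars.split₀ (PySem.Chars.strip s) = PySem.Chars.split₀ (PySem.Chars.lstrip s) := by
    rw [PySem.Chars.strip]
    conv_rhs => rw [ht]
    rw [pv_split₀_append_ws _ _ hall]
  rw [h1]
  unfold PySem.Chars.split₀ PySem.Chars.lstrip
  exact pv_go_lstrip s []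

theorem pv_go_snoc_nonws : ∀ (s cur : List Char) (acc : List (List Char)) (c : Char),
    PySem.Chars.isspace c = false → (s = [] → cur ≠ []) →
    (∀ d, s.getLast? = some d → PySem.Chars.isspace d = false) →
    (PySem.Chars.split₀.go (s ++ [c]) cur acc).length = (PySem.Chars.split₀.go s cur acc).length := by
  intro s
  induction s with
  | nil =>
    intro cur acc c hc hcur _
    have : cur ≠ [] := hcur rfl
    simp [pv_go_cons, pv_go_nil, hc, List.isEmpty_iff, this]
  | cons e s ih =>
    intro cur acc c hc _ hlast
    by_cases he : PySem.Chars.isspace e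
    · have hs : s ≠ [] := by
        rintro rfl
        have := hlast e (by simp)
        rw [this] at he; simp at he
      have hl : ∀ d, s.getLast? = some d → PySem.Chars.isspace d = false := by
        intro d hd
        apply hlast
        cases s with
        | nil => simp at hd
        | cons a t => simpa [List.getLast?_cons_cons] using hd
      simp only [List.cons_append, pv_go_cons, he, if_true]
      split_ifs <;> exact ih _ _ _ hc (fun h => absurd h hs) hl
    · have hl : ∀ d, s.getLast? = some d → PySem.Chars.isspace d = false := by
        intro d hd
        cases s with
        | nil => simp at hd
        | cons a t => exact hlast d (by simpa [List.getLast?_cons_cons] using hd)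
      simp only [List.cons_append, pv_go_cons, he, if_false, Bool.false_eq_true]
      exact ih _ _ _ hc (by simp) hl

theorem pv_go_split : ∀ (a b cur : List Char) (acc : List (List Char)),
    a.getLast? = some ' ' →
    PySem.Chars.split₀.go (a ++ b) cur acc = PySem.Chars.split₀.go a cur acc ++ PySem.Chars.split₀.go b [] [] := by
  intro a
  induction a with
  | nil => intro b cur acc h; simp at h
  | cons e a ih =>
    intro b cur acc h
    cases a with
    | nil =>
      simp at h
      subst h
      have hsp : PySem.Chars.isspace ' ' = true := by decide
      simp only [List.cons_append, List.nil_append, pv_go_cons, hsp, if_true]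
      split_ifs with h2
      · rw [pv_go_acc b [] acc, pv_go_nil]
        simp
      · rw [pv_go_acc b [] (cur.reverse :: acc), pv_go_nil]
        simp
    | cons f t =>
      have h' : (f :: t).getLast? = some ' ' := by simpa [List.getLast?_cons_cons] using h
      rw [List.cons_append, pv_go_cons, pv_go_cons]
      split_ifs <;> rw [ih _ _ _ h']

theorem pv_split₀_append_space (a b : List Char) (h : a.getLast? = some ' ') :
    PySem.Chars.split₀ (a ++ b) = PySem.Chars.split₀ a ++ PySem.Chars.split₀ b := by
  unfold PySem.Chars.split₀; exact pv_go_split a b [] [] h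

-- strip structure facts
theorem pv_rstrip_last {x : List Char} {d : Char} (h : (PySem.Chars.rstrip x).getLast? = some d) :
    PySem.Chars.isspace d = false := by
  rw [PySem.Chars.rstrip, List.getLast?_reverse] at h
  exact pv_dropWhile_head? h

theorem pv_strip_last {x : List Char} {d : Char} (h : (PySem.Chars.strip x).getLast? = some d) :
    PySem.Chars.isspace d = false := pv_rstrip_last h

theorem pv_strip_head {x : List Char} {d : Char} (h : (PySem.Chars.strip x).head? = some d) :
    PySem.Chars.isspace d = false := by
  rw [PySem.Chars.strip] at h
  obtain ⟨t, ht, _⟩ := pv_rstrip_decomp (PySem.Chars.lstrip x)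
  have hne : PySem.Chars.rstrip (PySem.Chars.lstrip x) ≠ [] := by
    intro hnil; rw [hnil] at h; simp at h
  have h2 := congrArg List.head? ht
  rw [List.head?_append_of_ne_nil _ hne, h] at h2
  rw [PySem.Chars.lstrip] at h2
  exact pv_dropWhile_head? h2

theorem pv_lstrip_eq_self {x : List Char} (h : ∀ c, x.head? = some c → PySem.Chars.isspace c = false) :
    PySem.Chars.lstrip x = x := pv_dropWhile_eq_self h

theorem pv_rstrip_eq_self {x : List Char} (h : ∀ c, x.getLast? = some c → PySem.Chars.isspace c = false) :
    PySem.Chars.rstrip x = x := by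
  have hh : ∀ c, x.reverse.head? = some c → PySem.Chars.isspace c = false := by
    intro c hc
    exact h c (by rwa [List.head?_reverse] at hc)
  rw [PySem.Chars.rstrip, pv_dropWhile_eq_self hh, List.reverse_reverse]

theorem pv_rstrip_snoc_space {d : List Char} (h : ∀ c, d.getLast? = some c → PySem.Chars.isspace c = false) :
    PySem.Chars.rstrip (d ++ [' ']) = d := by
  rw [PySem.Chars.rstrip, List.reverse_append]
  simp only [List.reverse_singleton, List.singleton_append, List.dropWhile_cons]
  have : PySem.Chars.isspace ' ' = true := by decide
  rw [this]
  simp only [if_true]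
  have := pv_rstrip_eq_self h
  rw [PySem.Chars.rstrip] at this
  simpa using this

theorem pv_punct_nonws {c : Char} (h : c ∈ pvPunct) : PySem.Chars.isspace c = false := by
  fin_cases h <;> decide

-- A's `current` is [] or `d ++ " "` with d nonempty, d ending in a punctuation char and
-- `current` starting with a non-whitespace char.
def pvGood (cs : List Char) : Prop :=
  cs = [] ∨ ∃ d c h, cs = d ++ [' '] ∧ d.getLast? = some c ∧ c ∈ pvPunct ∧
    cs.head? = some h ∧ PySem.Chars.isspace h = false

theorem pv_piece_shape (m : String) (hm : PySem.Chars.strip m.toList ≠ []) :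
    ∃ d c, pvPiece m = d ++ [' '] ∧ d.getLast? = some c ∧ c ∈ pvPunct ∧
      d.head? = (PySem.Chars.strip m.toList).head? := by
  set s := PySem.Chars.strip m.toList with hs
  obtain ⟨e, he⟩ : ∃ e, s.getLast? = some e := by
    cases hsx : s.getLast? with
    | none => exact absurd (List.getLast?_eq_none_iff.mp hsx) hm
    | some e => exact ⟨e, rfl⟩
  have hget : (PySem.List.pyGet? s (-1)).getD ' ' = e := by
    rw [pv_pyGet_neg_one hm, he]; rfl
  have hpiece : pvPiece m = s ++ (if pvPunct.contains e then [' '] else ['.', ' ']) := by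
    rw [pvPiece, ← hs, hget]
  by_cases hc : pvPunct.contains e
  · refine ⟨s, e, ?_, he, List.contains_iff_mem.mp hc, rfl⟩
    rw [hpiece, if_pos hc]
  · refine ⟨s ++ ['.'], '.', ?_, by simp, by decide, List.head?_append_of_ne_nil _ hm⟩
    rw [hpiece, if_neg hc]
    simp

theorem pv_piece_good (m : String) (hm : PySem.Chars.strip m.toList ≠ []) : pvGood (pvPiece m) := by
  obtain ⟨d, c, hp, hl, hc, hh⟩ := pv_piece_shape m hm
  obtain ⟨h0, hh0⟩ : ∃ h0, (PySem.Chars.strip m.toList).head? = some h0 := by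
    cases hsx : (PySem.Chars.strip m.toList).head? with
    | none => exact absurd (List.head?_eq_none_iff.mp hsx) hm
    | some h0 => exact ⟨h0, rfl⟩
  have hd : d ≠ [] := by
    intro h0; rw [h0] at hl; simp at hl
  refine Or.inr ⟨d, c, h0, hp, hl, hc, ?_, pv_strip_head hh0⟩
  rw [hp, List.head?_append_of_ne_nil _ hd, hh, hh0]

theorem pv_good_append {cur : List Char} (m : String) (hg : pvGood cur)
    (hm : PySem.Chars.strip m.toList ≠ []) : pvGood (cur ++ pvPiece m) := by
  rcases hg with rfl | ⟨d0, c0, h0, hcur, _, _, hhead, hws⟩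
  · simpa using pv_piece_good m hm
  · obtain ⟨d, c, hp, hl, hc, _⟩ := pv_piece_shape m hm
    have hd : d ≠ [] := by intro h; rw [h] at hl; simp at hl
    have hcne : cur ≠ [] := by rw [hcur]; simp
    refine Or.inr ⟨cur ++ d, c, h0, by rw [hp, List.append_assoc], ?_, hc, ?_, hws⟩
    · rw [List.getLast?_append_of_ne_nil _ hd, hl]
    · rw [List.head?_append_of_ne_nil _ hcne, hhead]

theorem pv_piece_len (m : String) (hm : PySem.Chars.strip m.toList ≠ []) :
    (PySem.Chars.split₀ (pvPiece m)).length = (PySem.Chars.split₀ m.toList).length := by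
  set s := PySem.Chars.strip m.toList with hs
  have hsp : ([' '] : List Char).all PySem.Chars.isspace = true := by decide
  have hstrip := pv_split₀_strip m.toList
  rw [pvPiece, ← hs]
  by_cases hc : pvPunct.contains ((PySem.List.pyGet? s (-1)).getD ' ')
  · rw [if_pos hc, pv_split₀_append_ws _ _ hsp, hstrip]
  · rw [if_neg hc]
    have : s ++ ['.', ' '] = (s ++ ['.']) ++ [' '] := by simp
    rw [this, pv_split₀_append_ws _ _ hsp]
    have hlen : (PySem.Chars.split₀ (s ++ ['.'])).length = (PySem.Chars.split₀ s).length := by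
      unfold PySem.Chars.split₀
      exact pv_go_snoc_nonws s [] [] '.' (by decide) (fun h => absurd h hm)
        (fun d hd => pv_strip_last hd)
    rw [hlen, hstrip]

theorem pv_len_append_piece {cur : List Char} (m : String) (hg : pvGood cur)
    (hm : PySem.Chars.strip m.toList ≠ []) :
    ((PySem.Chars.split₀ (cur ++ pvPiece m)).length : Int) =
      (PySem.Chars.split₀ cur).length + (PySem.Chars.split₀ m.toList).length := by
  rcases hg with rfl | ⟨d0, c0, h0, hcur, _, _, _, _⟩
  · simp [pv_piece_len m hm]
  · have hlast : cur.getLast? = some ' ' := by rw [hcur]; simp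
    rw [pv_split₀_append_space _ _ hlast, List.length_append, pv_piece_len m hm]
    push_cast; ring

theorem pv_good_strip {cur : List Char} (d : List Char) (c h : Char) (hcur : cur = d ++ [' '])
    (hl : d.getLast? = some c) (hc : c ∈ pvPunct) (hh : cur.head? = some h)
    (hws : PySem.Chars.isspace h = false) :
    PySem.Chars.strip cur = d ∧ cur.dropLast = d ∧ d ≠ [] := by
  have hd : d ≠ [] := by intro h0; rw [h0] at hl; simp at hl
  have hlastd : ∀ e, d.getLast? = some e → PySem.Chars.isspace e = false := by
    intro e he; rw [hl] at he; cases he; exact pv_punct_nonws hc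
  have hr : PySem.Chars.rstrip cur = d := by rw [hcur]; exact pv_rstrip_snoc_space hlastd
  have hlst : PySem.Chars.lstrip cur = cur := by
    apply pv_lstrip_eq_self
    intro e he; rw [hh] at he; cases he; exact hws
  refine ⟨?_, by rw [hcur]; exact List.dropLast_concat, hd⟩
  rw [PySem.Chars.strip, hlst, hr]

-- the loop invariant: A's (lines, current) matches the chunk-level one-pass fold
theorem pv_fold_inv (limit : Int) : ∀ (ms : List String) (la : List (List Char)) (cur : List Char)
    (parts : List (List Char)) (count : Int),
    (∀ m ∈ ms, PySem.Chars.strip m.toList ≠ []) →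
    cur = parts.flatten → ((PySem.Chars.split₀ cur).length : Int) = count → pvGood cur →
    (cur = [] ↔ parts = []) →
    (ms.foldl (pvStepA limit) (la, cur)).1 = (ms.foldl (pvStepB limit) (la, parts, count)).1 ∧
    (ms.foldl (pvStepA limit) (la, cur)).2 = (ms.foldl (pvStepB limit) (la, parts, count)).2.1.flatten ∧
    ((PySem.Chars.split₀ (ms.foldl (pvStepA limit) (la, cur)).2).length : Int) =
      (ms.foldl (pvStepB limit) (la, parts, count)).2.2 ∧
    pvGood (ms.foldl (pvStepA limit) (la, cur)).2 ∧
    ((ms.foldl (pvStepA limit) (la, cur)).2 = [] ↔ (ms.foldl (pvStepB limit) (la, parts, count)).2.1 = []) := by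
  intro ms
  induction ms with
  | nil =>
    intro la cur parts count _ hflat hcount hgood hempty
    exact ⟨rfl, hflat, hcount, hgood, hempty⟩
  | cons m ms ih =>
    intro la cur parts count hpre hflat hcount hgood hempty
    have hm : PySem.Chars.strip m.toList ≠ [] := hpre m (by simp)
    have hpre' : ∀ m' ∈ ms, PySem.Chars.strip m'.toList ≠ [] := fun m' h => hpre m' (by simp [h])
    have hpne : pvPiece m ≠ [] := by
      obtain ⟨d, c, hp, _⟩ := pv_piece_shape m hm
      rw [hp]; simp
    simp only [List.foldl_cons]
    by_cases hcond : ((PySem.Chars.split₀ cur).length : Int) + ((PySem.Chars.split₀ m.toList).length : Int) ≤ limit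
    · have hcondB : count + pvWeight m ≤ limit := by
        rw [← hcount]; exact hcond
      rw [show pvStepA limit (la, cur) m = (la, cur ++ pvPiece m) by simp [pvStepA, hcond],
          show pvStepB limit (la, parts, count) m =
            (la, parts ++ [pvPiece m], count + pvWeight m) by
            simp [pvStepB, hcondB]]
      apply ih
      · exact hpre'
      · rw [hflat]; simp
      · rw [pv_len_append_piece m hgood hm, hcount]; rfl
      · exact pv_good_append m hgood hm
      · constructor
        · intro h; exact absurd h (by simp [hpne])
        · intro h; simp at h
    · have hcondB : ¬ count + pvWeight m ≤ limit := by
        rw [← hcount]; exact hcond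
      have hlines : (if PySem.Chars.strip cur ≠ [] then la ++ [PySem.Chars.strip cur] else la) =
          la ++ pvEmit parts := by
        rcases hgood with rfl | ⟨d, c, h, hcur, hl, hc, hh, hws⟩
        · have : parts = [] := hempty.mp rfl
          simp [this, pvEmit, PySem.Chars.strip, PySem.Chars.lstrip, PySem.Chars.rstrip]
        · obtain ⟨hstrip, hdrop, hd⟩ := pv_good_strip d c h hcur hl hc hh hws
          have hcne : cur ≠ [] := by rw [hcur]; simp
          have hpne' : parts ≠ [] := fun h' => hcne (hempty.mpr h')
          simp only [pvEmit, ← hflat, hstrip, hdrop, ne_eq, hd, not_false_iff, if_true, hpne']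
      rw [show pvStepA limit (la, cur) m =
            ((if PySem.Chars.strip cur ≠ [] then la ++ [PySem.Chars.strip cur] else la), pvPiece m) by
            simp only [pvStepA]; rw [if_neg hcond],
          show pvStepB limit (la, parts, count) m =
            (la ++ pvEmit parts, [pvPiece m], pvWeight m) by
            simp only [pvStepB]; rw [if_neg hcondB],
          hlines]
      apply ih
      · exact hpre'
      · simp
      · simp only [pvWeight]; exact_mod_cast pv_piece_len m hm
      · simpa using pv_good_append (cur := []) m (Or.inl rfl) hm
      · simp [hpne]

-- stage-2 fold only ever appends to `starts`
theorem pv_stepC_acc (limit : Int) : ∀ (l : List (Int × Int)) (s0 s : List Int) (t : Int),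
    l.foldl (pvStepC limit) (s0 ++ s, t) =
      (s0 ++ (l.foldl (pvStepC limit) (s, t)).1, (l.foldl (pvStepC limit) (s, t)).2) := by
  intro l
  induction l with
  | nil => intro s0 s t; rfl
  | cons p l ih =>
    intro s0 s t
    simp only [List.foldl_cons, pvStepC]
    split_ifs with h
    · rw [List.append_assoc]; exact ih s0 (s ++ [p.1]) p.2
    · exact ih s0 s (t + p.2)

theorem pv_stepC_acc' (limit : Int) (l : List (Int × Int)) (s0 : List Int) (t : Int) :
    l.foldl (pvStepC limit) (s0, t) =
      (s0 ++ (l.foldl (pvStepC limit) ([], t)).1, (l.foldl (pvStepC limit) ([], t)).2) := by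
  simpa using pv_stepC_acc limit l s0 [] t

theorem pv_render_cons (P : List (List Char)) (a b : Int) (rest : List Int) :
    pvRender P (a :: b :: rest) =
      (if a < b then [(PySem.List.slice P (some a) (some b)).flatten.dropLast] else []) ++
        pvRender P (b :: rest) := by
  simp only [pvRender, List.tail_cons, List.zip_cons_cons, List.filterMap_cons]
  split_ifs <;> simp

-- the bridge: the chunk-level one-pass fold equals B's break-indices-then-slice rendering
theorem pv_bridge (limit : Int) (P : List (List Char)) :
    ∀ (ms : List String) (i g : Nat) (lines parts : List (List Char)) (count : Int),
    P.drop i = ms.map pvPiece → g ≤ i → parts = (P.take i).drop g →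
    ((ms.foldl (pvStepB limit) (lines, parts, count)).1 ++
        pvEmit (ms.foldl (pvStepB limit) (lines, parts, count)).2.1) =
      lines ++ pvRender P ((g : Int) ::
        ((PySem.List.enumerate (ms.map pvWeight) (i : Int)).foldl (pvStepC limit) ([], count)).1
        ++ [(P.length : Int)]) := by
  intro ms
  induction ms with
  | nil =>
    intro i g lines parts count hdrop hgi hparts
    have hlen : P.length ≤ i := List.drop_eq_nil_iff.mp (by simpa using hdrop)
    have htake : P.take i = P := List.take_of_length_le hlen
    have hparts' : parts = P.drop g := by rw [hparts, htake]
    simp only [List.foldl_nil, List.map_nil, PySem.List.enumerate_nil]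
    have hr2 : pvRender P [(g : Int), (P.length : Int)] =
        if (g : Int) < (P.length : Int) then
          [(PySem.List.slice P (some (g : Int)) (some (P.length : Int))).flatten.dropLast] else [] := by
      rw [pv_render_cons]
      simp [pvRender]
    simp only [List.singleton_append]
    rw [hr2]
    by_cases hg : g < P.length
    · have hne : parts ≠ [] := by
        rw [hparts']
        simp only [ne_eq, List.drop_eq_nil_iff, not_le]
        exact hg
      have hsl : PySem.List.slice P (some (g : Int)) (some (P.length : Int)) = P.drop g := by
        rw [PySem.List.slice_natCast, List.take_of_length_le (by simp)]
      have hne' : ¬ (List.drop g P = []) := by rw [← hparts']; exact hne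
      rw [if_pos (by exact_mod_cast hg)]
      simp [pvEmit, hparts', hne', hsl]
    · have hnil : parts = [] := by
        rw [hparts']
        simpa using Nat.le_of_not_lt hg
      rw [if_neg (by exact_mod_cast hg)]
      simp [pvEmit, hnil]
  | cons m ms ih =>
    intro i g lines parts count hdrop hgi hparts
    have hlt : i < P.length := by
      by_contra hc
      rw [List.drop_eq_nil_iff.mpr (Nat.le_of_not_lt hc)] at hdrop
      simp at hdrop
    have hget : P[i]? = some (pvPiece m) := by
      rw [← List.head?_drop, hdrop]; rfl
    have htake1 : P.take (i + 1) = P.take i ++ [pvPiece m] := by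
      rw [List.take_add_one, hget]; rfl
    have hdrop' : P.drop (i + 1) = ms.map pvPiece := by
      have := congrArg List.tail hdrop
      simpa [List.tail_drop] using this
    have hlentake : (P.take i).length = i := by
      simp [Nat.le_of_lt hlt]
    simp only [List.map_cons, PySem.List.enumerate_cons, List.foldl_cons]
    by_cases hcond : count + pvWeight m ≤ limit
    · rw [show pvStepB limit (lines, parts, count) m = (lines, parts ++ [pvPiece m], count + pvWeight m) by
          simp [pvStepB, hcond],
        show pvStepC limit ([], count) ((i : Int), pvWeight m) = ([], count + pvWeight m) by
          simp only [pvStepC]; rw [if_neg (by omega)]]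
      have hcast : (i : Int) + 1 = ((i + 1 : Nat) : Int) := by push_cast; ring
      rw [hcast]
      apply ih (i + 1) g lines _ _ hdrop' (Nat.le_succ_of_le hgi)
      rw [hparts, htake1, List.drop_append_of_le_length (by omega)]
    · rw [show pvStepB limit (lines, parts, count) m = (lines ++ pvEmit parts, [pvPiece m], pvWeight m) by
          simp only [pvStepB]; rw [if_neg hcond],
        show pvStepC limit ([], count) ((i : Int), pvWeight m) = ([(i : Int)], pvWeight m) by
          simp only [pvStepC]; rw [if_pos (by omega)]; simp]
      have hcast : (i : Int) + 1 = ((i + 1 : Nat) : Int) := by push_cast; ring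
      rw [hcast, pv_stepC_acc']
      have hih := ih (i + 1) i (lines ++ pvEmit parts) [pvPiece m] (pvWeight m) hdrop' (Nat.le_succ _)
        (by rw [htake1, List.drop_append_of_le_length (by omega), List.drop_eq_nil_iff.mpr (by omega)]; rfl)
      rw [hih, List.append_assoc]
      congr 1
      simp only [List.cons_append, List.append_assoc]
      rw [pv_render_cons]
      have hsl : PySem.List.slice P (some (g : Int)) (some (i : Int)) = (P.take i).drop g := by
        rw [PySem.List.slice_natCast, List.drop_take]
      congr 1
      by_cases hg : g < i
      · have hne : parts ≠ [] := by
          rw [hparts, List.drop_take]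
          simp only [ne_eq, List.take_eq_nil_iff, List.drop_eq_nil_iff, not_or, not_le]
          omega
        have hne' : ¬ (List.drop g (List.take i P) = []) := by rw [← hparts]; exact hne
        rw [if_pos (by exact_mod_cast hg)]
        simp [pvEmit, hparts, hne', hsl]
      · have hnil : parts = [] := by
          rw [hparts]
          have : g = i := by omega
          subst this
          rw [List.drop_eq_nil_iff.mpr (by omega)]
        rw [if_neg (by exact_mod_cast hg)]
        simp [pvEmit, hnil]

-- ===== VERDICT (by name: the statement is the Claim_ definition above) =====
theorem combine_lines_spec : Claim_equal_combine_lines := by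
  intro sentences limit _ hpre
  unfold Spec_combine_lines combine_lines combine_lines_alt
  dsimp only
  obtain ⟨h1, h2, h3, h4, h5⟩ :=
    pv_fold_inv limit sentences [] [] [] 0 hpre rfl (by rfl) (Or.inl rfl) (by simp)
  set ra := sentences.foldl (pvStepA limit) ([], [])
  set rb := sentences.foldl (pvStepB limit) ([], [], 0)
  have hA : (if PySem.Chars.strip ra.2 ≠ [] then
        ra.1 ++ [PySem.Chars.strip ra.2 ++
          (if pvPunct.contains ((PySem.List.pyGet? (PySem.Chars.strip ra.2) (-1)).getD ' ')
            then [] else ['.'])]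
      else ra.1) = rb.1 ++ pvEmit rb.2.1 := by
    rcases h4 with hnil | ⟨d, c, h, hcur, hl, hc, hh, hws⟩
    · have hb : rb.2.1 = [] := h5.mp hnil
      rw [hnil, hb]
      simp [pvEmit, PySem.Chars.strip, PySem.Chars.lstrip, PySem.Chars.rstrip, h1]
    · obtain ⟨hstrip, hdrop, hd⟩ := pv_good_strip d c h hcur hl hc hh hws
      have hcne : ra.2 ≠ [] := by rw [hcur]; simp
      have hbne : rb.2.1 ≠ [] := fun h' => hcne (h5.mpr h')
      have hget : (PySem.List.pyGet? (PySem.Chars.strip ra.2) (-1)).getD ' ' = c := by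
        rw [hstrip, pv_pyGet_neg_one hd, hl]; rfl
      have hcont : pvPunct.contains ((PySem.List.pyGet? (PySem.Chars.strip ra.2) (-1)).getD ' ') = true := by
        rw [hget]; simpa using hc
      rw [if_pos (by simp [hstrip, hd] : ¬ PySem.Chars.strip ra.2 = [])]
      rw [hcont, h1]
      simp [pvEmit, hbne, hstrip, ← h2, hdrop]
  rw [hA]
  have hbr := pv_bridge limit (sentences.map pvPiece) sentences 0 0 [] [] 0 rfl (le_refl 0) rfl
  simp only [Nat.cast_zero] at hbr
  rw [show rb.1 ++ pvEmit rb.2.1 =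
      (sentences.foldl (pvStepB limit) ([], [], 0)).1 ++
        pvEmit (sentences.foldl (pvStepB limit) ([], [], 0)).2.1 from rfl, hbr]
  simp [PySem.List.len_eq]
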